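-- pv_equiv track=rewrite | github.com/levlai/chiralipy | chiralipy/canon.py | _count_swaps_to_interconvert
-- ===== SOURCE A (Python) =====
-- def _count_swaps_to_interconvert(perm: list[int], sorted_perm: list[int]) -> int:
--     """Count minimum swaps to convert perm to sorted_perm.
--
--     Uses a cycle decomposition approach to count swaps.
--     """
--     if len(perm) != len(sorted_perm):
--         return 0
--
--     # Create a mapping from value to target position
--     target_pos = {v: i for i, v in enumerate(sorted_perm)}
--
--     # Work on a copy
--     current = list(perm)
--     n_swaps = 0
--
--     for i in range(len(current)):
--         # Find where current[i] should go
--         target = target_pos[current[i]]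
--         while target != i:
--             # Swap current[i] with current[target]
--             current[i], current[target] = current[target], current[i]
--             n_swaps += 1
--             target = target_pos[current[i]]
--
--     return n_swaps
-- ===== SOURCE B (Python) =====
-- def _count_swaps_to_interconvert(perm: list[int], sorted_perm: list[int]) -> int:
--     """Count minimum swaps to convert perm to sorted_perm.
--
--     Cycle-walk over a visited array: no mutation of the data, one pointer
--     chase per cycle; answer is sum over cycles of (length - 1).
--     """
--     if len(perm) != len(sorted_perm):
--         return 0
--     target_pos = {v: i for i, v in enumerate(sorted_perm)}
--     p = [target_pos[v] for v in perm]
--     visited = [False] * len(p)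
--     total = 0
--     for i in range(len(p)):
--         if visited[i]:
--             continue
--         j = i
--         cyc = 0
--         while not visited[j]:
--             visited[j] = True
--             j = p[j]
--             cyc += 1
--         total += cyc - 1
--     return total
-- ===== Notes on version B (the rewrite author's own statement) =====
-- stated objective: alternative
-- what changed: Replaces A's in-place swapping loop (repeatedly swapping current[i] into place) with a read-only cycle traversal over an index permutation and a visited array, summing (cycle length - 1) per cycle.
import Mathlib
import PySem

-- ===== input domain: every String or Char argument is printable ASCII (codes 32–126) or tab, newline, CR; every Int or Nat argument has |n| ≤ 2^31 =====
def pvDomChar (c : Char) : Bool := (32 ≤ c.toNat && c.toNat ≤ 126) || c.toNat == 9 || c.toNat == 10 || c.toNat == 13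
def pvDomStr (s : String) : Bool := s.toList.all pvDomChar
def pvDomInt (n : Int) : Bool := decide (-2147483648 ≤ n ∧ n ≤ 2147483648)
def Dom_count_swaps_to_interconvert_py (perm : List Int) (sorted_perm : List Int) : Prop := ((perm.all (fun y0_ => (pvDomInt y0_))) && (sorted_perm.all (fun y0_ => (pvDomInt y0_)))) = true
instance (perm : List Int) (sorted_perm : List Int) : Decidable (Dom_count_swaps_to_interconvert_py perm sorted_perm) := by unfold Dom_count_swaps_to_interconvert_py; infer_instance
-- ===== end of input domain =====

-- B replaces A's in-place swapping loop with a read-only cycle traversal over a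
-- visited array, summing (cycle length - 1) per cycle (objective: alternative).

-- ===== PORT A =====
-- target_pos = {v: i for i, v in enumerate(sorted_perm)}
def pvTargetPosA (sorted_perm : List Int) : PySem.Dict Int Int :=
  (PySem.List.enumerate sorted_perm 0).foldl (fun d iv => d.insert iv.2 iv.1) PySem.Dict.empty

-- the 'while target != i' loop, fuel-bounded (Pre_ excludes the inputs where the
-- Python loop would not terminate; dict/list accesses use defaults where Python
-- would raise KeyError — those inputs are outside Pre_ too).  State: (current, n_swaps).
def pvWhileA (tp : PySem.Dict Int Int) (i : Int) :
    Nat → List Int × Int → List Int × Int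
  | 0, s => s
  | fuel + 1, (c, k) =>
    let target := tp.getD (PySem.List.pyGetD c i 0) 0
    if target = i then (c, k)
    else
      let ci := PySem.List.pyGetD c i 0
      let ct := PySem.List.pyGetD c target 0
      pvWhileA tp i fuel (PySem.List.pySetD (PySem.List.pySetD c i ct) target ci, k + 1)

def count_swaps_to_interconvert_py (perm : List Int) (sorted_perm : List Int) : Int :=
  if perm.length ≠ sorted_perm.length then 0
  else
    let tp := pvTargetPosA sorted_perm
    let res := (PySem.List.pyRange 0 perm.length 1).foldl
      (fun s i => pvWhileA tp i (perm.length + 1) s) (perm, 0)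
    res.2

-- ===== PORT B =====
-- target_pos = {v: i for i, v in enumerate(sorted_perm)}
def pvTargetPosB (sorted_perm : List Int) : PySem.Dict Int Int :=
  (PySem.List.enumerate sorted_perm 0).foldl (fun d iv => d.insert iv.2 iv.1) PySem.Dict.empty

-- the 'while not visited[j]' pointer chase, fuel-bounded (the Python loop always
-- terminates on in-range p; fuel n+1 is enough).  State: (visited, j, cyc).
def pvWalkB (p : List Int) :
    Nat → List Bool × Int × Int → List Bool × Int × Int
  | 0, s => s
  | fuel + 1, (vis, j, cyc) =>
    if PySem.List.pyGetD vis j false then (vis, j, cyc)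
    else pvWalkB p fuel (PySem.List.pySetD vis j true, PySem.List.pyGetD p j 0, cyc + 1)

def count_swaps_to_interconvert_py_alt (perm : List Int) (sorted_perm : List Int) : Int :=
  if perm.length ≠ sorted_perm.length then 0
  else
    let tp := pvTargetPosB sorted_perm
    let p := perm.map (fun v => tp.getD v 0)
    let res := (PySem.List.pyRange 0 (p.length : Int) 1).foldl
      (fun s i =>
        if PySem.List.pyGetD s.1 i false then s
        else
          let w := pvWalkB p (p.length + 1) (s.1, i, 0)
          (w.1, s.2 + w.2.2 - 1))
      (List.replicate p.length false, 0)
    res.2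

-- ===== PRECONDITION & SPEC =====
-- Pre_ excludes only inputs on which the Python A never returns: equal-length
-- inputs that are not a duplicate-free rearrangement of sorted_perm make A loop
-- forever or raise KeyError (never return a value).
def Pre_count_swaps_to_interconvert_py (perm : List Int) (sorted_perm : List Int) : Prop :=
  perm.length ≠ sorted_perm.length ∨ (perm.Nodup ∧ perm.Perm sorted_perm)

instance (perm : List Int) (sorted_perm : List Int) : Decidable (Pre_count_swaps_to_interconvert_py perm sorted_perm) := by
  unfold Pre_count_swaps_to_interconvert_py; infer_instance

def pvWitness_count_swaps_to_interconvert_py : List Int × List Int := ([3, 1, 2], [1, 2, 3])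

def Spec_count_swaps_to_interconvert_py (perm : List Int) (sorted_perm : List Int) (out : Int) : Prop := out = count_swaps_to_interconvert_py_alt perm sorted_perm
instance (perm : List Int) (sorted_perm : List Int) (out : Int) : Decidable (Spec_count_swaps_to_interconvert_py perm sorted_perm out) := by unfold Spec_count_swaps_to_interconvert_py; infer_instance

-- ===== CLAIM (what is proved, stated in full; the proofs are below) =====
def Claim_equal_count_swaps_to_interconvert_py : Prop := ∀ (perm : List Int) (sorted_perm : List Int), Dom_count_swaps_to_interconvert_py perm sorted_perm → Pre_count_swaps_to_interconvert_py perm sorted_perm → Spec_count_swaps_to_interconvert_py perm sorted_perm (count_swaps_to_interconvert_py perm sorted_perm)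

-- ===== LEMMAS AND PROOFS =====

-- value -> position lookup used by both ports
def pvI (sp : List Int) (v : Int) : Int := (pvTargetPosA sp).getD v 0

-- the index permutation as a function on Nat
def pvF (P : List Int) (j : Nat) : Nat := (P.getD j 0).toNat

-- A's while loop transported to the position list q = current.map (pvI sp)
def pvWhileQ (i : Int) : Nat → List Int × Int → List Int × Int
  | 0, s => s
  | fuel + 1, (q, k) =>
    let t := PySem.List.pyGetD q i 0
    if t = i then (q, k)
    else pvWhileQ i fuel
      (PySem.List.pySetD (PySem.List.pySetD q i (PySem.List.pyGetD q t 0)) t (PySem.List.pyGetD q i 0), k + 1)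

-- the loop body of port B's outer fold
def pvBstep (P : List Int) (s : List Bool × Int) (i : Int) : List Bool × Int :=
  if PySem.List.pyGetD s.1 i false then s
  else
    let w := pvWalkB P (P.length + 1) (s.1, i, 0)
    (w.1, s.2 + w.2.2 - 1)

-- Bool test: does some iterate F^[t] m with a ≤ t < b hit j ?
def pvHit (P : List Int) (m a b j : Nat) : Bool :=
  (List.range (b - a)).any (fun t => (pvF P)^[a + t] m == j)

theorem pvHit_iff (P : List Int) (m a b j : Nat) :
    pvHit P m a b j = true ↔ ∃ t, a ≤ t ∧ t < b ∧ (pvF P)^[t] m = j := by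
  unfold pvHit
  simp only [List.any_eq_true, List.mem_range, beq_iff_eq]
  constructor
  · rintro ⟨t, ht, h⟩; exact ⟨a + t, by omega, by omega, h⟩
  · rintro ⟨t, h1, h2, h⟩; exact ⟨t - a, by omega, by rwa [Nat.add_sub_cancel' h1]⟩

-- getD after set, with an arbitrary default
theorem pv_getD_set {α : Type} (xs : List α) (a j : Nat) (v d : α) :
    (xs.set a v).getD j d = if a = j ∧ a < xs.length then v else xs.getD j d := by
  simp [List.getD_eq_getElem?_getD, List.getElem?_set]
  split_ifs with h1 h2 h3 <;> simp_all
  omega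

-- dict characterization: position of the k-th element of a nodup list
theorem pvTargetPos_append (ys : List Int) (y : Int) :
    pvTargetPosA (ys ++ [y]) = (pvTargetPosA ys).insert y (ys.length : Int) := by
  unfold pvTargetPosA
  rw [PySem.List.enumerate_append, List.foldl_append]
  simp [PySem.List.enumerate]

theorem pvI_getElem (sp : List Int) (nd : sp.Nodup) (k : Nat) (hk : k < sp.length) :
    pvI sp sp[k] = (k : Int) := by
  induction sp using List.reverseRecOn generalizing k with
  | nil => simp at hk
  | append_singleton ys y ih =>
    have hny : y ∉ ys := by simp [List.nodup_append] at nd; tauto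
    have hnd' : ys.Nodup := (List.nodup_append.mp nd).1
    rcases Nat.lt_or_ge k ys.length with h | h
    · rw [List.getElem_append_left h]
      unfold pvI
      rw [pvTargetPos_append, PySem.Dict.getD_insert]
      have : ys[k] ≠ y := fun he => hny (he ▸ List.getElem_mem h)
      rw [if_neg this]
      exact ih hnd' k h
    · have hk' : k = ys.length := by simp at hk; omega
      subst hk'
      unfold pvI
      rw [pvTargetPos_append, PySem.Dict.getD_insert]
      simp

theorem pvI_mem (sp : List Int) (nd : sp.Nodup) (v : Int) (hv : v ∈ sp) :
    0 ≤ pvI sp v ∧ pvI sp v < sp.length ∧ sp.getD (pvI sp v).toNat 0 = v := by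
  obtain ⟨k, hk, rfl⟩ := List.mem_iff_getElem.mp hv
  rw [pvI_getElem sp nd k hk]
  refine ⟨by positivity, by exact_mod_cast hk, ?_⟩
  simp [List.getD_eq_getElem?_getD, hk]

-- === facts about pvF on a "good" position list P ===
-- hG : entries of P are positions; hnd : P has no duplicates

theorem pvF_lt (P : List Int) (hG : ∀ j < P.length, 0 ≤ P.getD j 0 ∧ P.getD j 0 < P.length)
    (j : Nat) (hj : j < P.length) : pvF P j < P.length := by
  have := hG j hj; unfold pvF; omega

theorem pvF_inj (P : List Int) (hG : ∀ j < P.length, 0 ≤ P.getD j 0 ∧ P.getD j 0 < P.length)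
    (hnd : P.Nodup) (a b : Nat) (ha : a < P.length) (hb : b < P.length)
    (h : pvF P a = pvF P b) : a = b := by
  have h1 := hG a ha; have h2 := hG b hb
  have he : P.getD a 0 = P.getD b 0 := by unfold pvF at h; omega
  rw [List.getD_eq_getElem _ _ ha, List.getD_eq_getElem _ _ hb] at he
  exact List.Nodup.getElem_inj_iff hnd |>.mp he

theorem pvF_iter_lt (P : List Int) (hG : ∀ j < P.length, 0 ≤ P.getD j 0 ∧ P.getD j 0 < P.length)
    (m : Nat) (hm : m < P.length) (t : Nat) : (pvF P)^[t] m < P.length := by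
  induction t with
  | zero => simpa
  | succ t ih => rw [Function.iterate_succ_apply']; exact pvF_lt P hG _ ih

theorem pvF_iter_inj (P : List Int) (hG : ∀ j < P.length, 0 ≤ P.getD j 0 ∧ P.getD j 0 < P.length)
    (hnd : P.Nodup) (t : Nat) (x y : Nat) (hx : x < P.length) (hy : y < P.length)
    (h : (pvF P)^[t] x = (pvF P)^[t] y) : x = y := by
  induction t with
  | zero => simpa using h
  | succ t ih =>
    rw [Function.iterate_succ_apply', Function.iterate_succ_apply'] at h
    exact ih (pvF_inj P hG hnd _ _ (pvF_iter_lt P hG x hx t) (pvF_iter_lt P hG y hy t) h)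

theorem pvF_periodic (P : List Int) (hG : ∀ j < P.length, 0 ≤ P.getD j 0 ∧ P.getD j 0 < P.length)
    (hnd : P.Nodup) (m : Nat) (hm : m < P.length) : m ∈ Function.periodicPts (pvF P) := by
  have key : ∀ a b : Nat, a < b → (pvF P)^[a] m = (pvF P)^[b] m →
      m ∈ Function.periodicPts (pvF P) := by
    intro a b hab he
    have hsplit : (pvF P)^[a] ((pvF P)^[b - a] m) = (pvF P)^[a] m := by
      rw [← Function.iterate_add_apply, show a + (b - a) = b by omega]
      exact he.symm
    have : (pvF P)^[b - a] m = m :=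
      pvF_iter_inj P hG hnd a _ _ (pvF_iter_lt P hG m hm _) hm hsplit
    exact ⟨b - a, by omega, this⟩
  have hmap : ∀ t ∈ Finset.range (P.length + 1), (pvF P)^[t] m ∈ Finset.range P.length := by
    intro t _; simpa using pvF_iter_lt P hG m hm t
  obtain ⟨a, ha, b, hb, hne, he⟩ :=
    Finset.exists_ne_map_eq_of_card_lt_of_maps_to (by simp) hmap
  rcases Nat.lt_or_ge a b with h | h
  · exact key a b h he
  · exact key b a (by omega) he.symm

theorem pv_cl_pos (P : List Int) (hG : ∀ j < P.length, 0 ≤ P.getD j 0 ∧ P.getD j 0 < P.length)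
    (hnd : P.Nodup) (m : Nat) (hm : m < P.length) : 0 < Function.minimalPeriod (pvF P) m :=
  Function.minimalPeriod_pos_iff_mem_periodicPts.mpr (pvF_periodic P hG hnd m hm)

theorem pv_cl_le (P : List Int) (hG : ∀ j < P.length, 0 ≤ P.getD j 0 ∧ P.getD j 0 < P.length)
    (hnd : P.Nodup) (m : Nat) (hm : m < P.length) :
    Function.minimalPeriod (pvF P) m ≤ P.length := by
  have : Function.minimalPeriod (pvF P) m = (Finset.range (Function.minimalPeriod (pvF P) m)).card := by simp
  rw [this, show P.length = (Finset.range P.length).card by simp]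
  apply Finset.card_le_card_of_injOn (fun t => (pvF P)^[t] m)
  · intro t _; simpa using pvF_iter_lt P hG m hm t
  · intro a ha b hb h
    exact Function.iterate_injOn_Iio_minimalPeriod (by simpa using ha) (by simpa using hb) h

-- complement of a forward-closed visited set is forward-closed
theorem pv_unvis_closed (P : List Int) (hG : ∀ j < P.length, 0 ≤ P.getD j 0 ∧ P.getD j 0 < P.length)
    (hnd : P.Nodup) (vis : List Bool)
    (hcl : ∀ j < P.length, vis.getD j false = true → vis.getD (pvF P j) false = true)
    (j : Nat) (hj : j < P.length) (hv : vis.getD j false = false) :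
    vis.getD (pvF P j) false = false := by
  set V : Finset Nat := (Finset.range P.length).filter (fun j => vis.getD j false = true) with hV
  have hmem : ∀ v, v ∈ V ↔ v < P.length ∧ vis.getD v false = true := by
    intro v; simp [hV]
  have hsub : V.image (pvF P) ⊆ V := by
    intro x hx
    simp only [Finset.mem_image] at hx
    obtain ⟨v, hvV, rfl⟩ := hx
    have := (hmem v).mp hvV
    exact (hmem _).mpr ⟨pvF_lt P hG v this.1, hcl v this.1 this.2⟩
  have hcard : V.card ≤ (V.image (pvF P)).card := by
    rw [Finset.card_image_of_injOn]
    intro a ha b hb h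
    exact pvF_inj P hG hnd a b ((hmem a).mp ha).1 ((hmem b).mp hb).1 h
  have heq : V.image (pvF P) = V := Finset.eq_of_subset_of_card_le hsub hcard
  by_contra hne
  have htrue : vis.getD (pvF P j) false = true := by
    cases h : vis.getD (pvF P j) false
    · exact absurd h hne
    · rfl
  have hin : pvF P j ∈ V := (hmem _).mpr ⟨pvF_lt P hG j hj, htrue⟩
  rw [← heq] at hin
  simp only [Finset.mem_image] at hin
  obtain ⟨v, hvV, he⟩ := hin
  have hvlt := ((hmem v).mp hvV).1
  have : v = j := pvF_inj P hG hnd v j hvlt hj he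
  subst this
  rw [((hmem v).mp hvV).2] at hv
  simp at hv

theorem pv_orbit_unvis (P : List Int) (hG : ∀ j < P.length, 0 ≤ P.getD j 0 ∧ P.getD j 0 < P.length)
    (hnd : P.Nodup) (vis : List Bool)
    (hcl : ∀ j < P.length, vis.getD j false = true → vis.getD (pvF P j) false = true)
    (m : Nat) (hm : m < P.length) (hv : vis.getD m false = false) (t : Nat) :
    vis.getD ((pvF P)^[t] m) false = false := by
  induction t with
  | zero => simpa
  | succ t ih =>
    rw [Function.iterate_succ_apply']
    exact pv_unvis_closed P hG hnd vis hcl _ (pvF_iter_lt P hG m hm t) ih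

-- === A's while loop on q resolves the cycle of m, counting (cl - s) swaps from stage s ===
theorem pvWhileQ_step (i : Int) (f : Nat) (q : List Int) (k : Int) :
    pvWhileQ i (f + 1) (q, k) =
      if PySem.List.pyGetD q i 0 = i then (q, k)
      else pvWhileQ i f
        (PySem.List.pySetD (PySem.List.pySetD q i (PySem.List.pyGetD q (PySem.List.pyGetD q i 0) 0)) (PySem.List.pyGetD q i 0) (PySem.List.pyGetD q i 0), k + 1) := rfl

theorem pv_whileQ_spec (P : List Int)
    (hG : ∀ j < P.length, 0 ≤ P.getD j 0 ∧ P.getD j 0 < P.length) (hnd : P.Nodup)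
    (vis : List Bool) (m : Nat) (hm : m < P.length)
    (horb : ∀ t, vis.getD ((pvF P)^[t] m) false = false) :
    ∀ fuel s q k, 1 ≤ s → s ≤ Function.minimalPeriod (pvF P) m →
      Function.minimalPeriod (pvF P) m - s < fuel →
      q.length = P.length →
      (∀ j < P.length, q.getD j 0 =
        if j = m then (((pvF P)^[s] m : Nat) : Int)
        else if (vis.getD j false || pvHit P m 1 s j) = true then (j : Int)
        else P.getD j 0) →
      ∃ q', pvWhileQ (m : Int) fuel (q, k) = (q', k + ((Function.minimalPeriod (pvF P) m - s : Nat) : Int))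
        ∧ q'.length = P.length
        ∧ (∀ j < P.length, q'.getD j 0 =
            if (vis.getD j false || pvHit P m 0 (Function.minimalPeriod (pvF P) m) j) = true
            then (j : Int) else P.getD j 0) := by
  intro fuel
  induction fuel with
  | zero => intro s q k hs1 hs2 hfuel; omega
  | succ f ih =>
    intro s q k hs1 hs2 hfuel hlen hchar
    set cl := Function.minimalPeriod (pvF P) m with hcl
    have hclpos : 0 < cl := pv_cl_pos P hG hnd m hm
    have hiter : (pvF P)^[cl] m = m := by rw [hcl]; exact Function.iterate_minimalPeriod
    have ht0 : PySem.List.pyGetD q (m : Int) 0 = (((pvF P)^[s] m : Nat) : Int) := by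
      rw [PySem.List.pyGetD_natCast, hchar m hm, if_pos rfl]
    rcases Nat.lt_or_ge s cl with hlt | hge
    · -- swap step
      set t' : Nat := (pvF P)^[s] m with ht'
      have ht'lt : t' < P.length := pvF_iter_lt P hG m hm s
      have ht'ne : t' ≠ m := by
        intro he
        have hper : Function.IsPeriodicPt (pvF P) s m := he
        have := Function.IsPeriodicPt.minimalPeriod_le (by omega) hper
        omega
      have hne : ¬ ((((pvF P)^[s] m : Nat) : Int) = (m : Int)) := by
        simp only [Int.natCast_inj]; exact ht'ne
      have hqt : PySem.List.pyGetD q ((t' : Nat) : Int) 0 = (((pvF P)^[s + 1] m : Nat) : Int) := by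
        rw [PySem.List.pyGetD_natCast, hchar t' ht'lt, if_neg ht'ne]
        have hv : vis.getD t' false = false := horb s
        have hh : pvHit P m 1 s t' = false := by
          rw [Bool.eq_false_iff]
          intro h
          obtain ⟨t, h1, h2, h3⟩ := (pvHit_iff _ _ _ _ _).mp h
          have : t = s := Function.iterate_injOn_Iio_minimalPeriod
            (Set.mem_Iio.mpr (by omega)) (Set.mem_Iio.mpr (by omega)) (h3.trans ht')
          omega
        rw [hv, hh]
        simp only [Bool.or_false, if_neg (by simp : ¬ (false = true))]
        have hfold : (pvF P)^[s + 1] m = pvF P t' := by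
          rw [Function.iterate_succ_apply', ht']
        rw [hfold]
        have h2 := hG _ ht'lt
        simp only [pvF]
        omega
      have hq' : PySem.List.pySetD (PySem.List.pySetD q (m : Int) (PySem.List.pyGetD q (((pvF P)^[s] m : Nat) : Int) 0)) (((pvF P)^[s] m : Nat) : Int) (PySem.List.pyGetD q (m : Int) 0)
          = (q.set m (((pvF P)^[s + 1] m : Nat) : Int)).set t' ((t' : Nat) : Int) := by
        rw [ht0, hqt]
        rw [PySem.List.pySetD_natCast, PySem.List.pySetD_natCast]
      obtain ⟨q', heq, hlen', hchar'⟩ := ih (s + 1) ((q.set m (((pvF P)^[s + 1] m : Nat) : Int)).set t' ((t' : Nat) : Int)) (k + 1)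
        (by omega) (by omega) (by omega) (by simpa using hlen)
        (by
          intro j hj
          rw [pv_getD_set, pv_getD_set]
          by_cases hjm : j = m
          · subst hjm
            rw [if_neg (by exact fun hc => ht'ne (hc.1)), if_pos ⟨rfl, by omega⟩, if_pos rfl]
          · rw [if_neg hjm]
            by_cases hjt : t' = j
            · subst hjt
              rw [if_pos ⟨rfl, by simpa [hlen] using ht'lt⟩]
              have : pvHit P m 1 (s + 1) t' = true := by
                rw [pvHit_iff]; exact ⟨s, by omega, by omega, ht'.symm⟩
              rw [this, Bool.or_true, if_pos rfl]
            · rw [if_neg (fun hc => hjt hc.1), if_neg (fun hc => hjm hc.1.symm)]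
              rw [hchar j hj, if_neg hjm]
              have : pvHit P m 1 s j = pvHit P m 1 (s + 1) j := by
                rw [Bool.eq_iff_iff, pvHit_iff, pvHit_iff]
                constructor
                · rintro ⟨t, h1, h2, h3⟩; exact ⟨t, h1, by omega, h3⟩
                · rintro ⟨t, h1, h2, h3⟩
                  refine ⟨t, h1, ?_, h3⟩
                  rcases Nat.lt_or_ge t s with h4 | h4
                  · exact h4
                  · have : t = s := by omega
                    subst this
                    exact absurd h3 (fun he => hjt (ht' ▸ he))
              rw [this])
      refine ⟨q', ?_, hlen', hchar'⟩
      rw [pvWhileQ_step, if_neg (ht0 ▸ hne), ht0, hqt, PySem.List.pySetD_natCast, PySem.List.pySetD_natCast]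
      rw [heq]
      congr 1
      omega
    · -- s = cl : loop exits immediately
      have hseq : s = cl := by omega
      have hstop : (((pvF P)^[s] m : Nat) : Int) = (m : Int) := by
        rw [hseq, hiter]
      refine ⟨q, ?_, hlen, ?_⟩
      · show pvWhileQ (m : Int) (f + 1) (q, k) = _
        rw [show pvWhileQ (m : Int) (f + 1) (q, k) = (q, k) by
          simp only [pvWhileQ]
          rw [ht0, hstop]
          simp]
        rw [hseq]
        simp
      · intro j hj
        rw [hchar j hj]
        by_cases hjm : j = m
        · subst hjm
          rw [if_pos rfl]
          have hh : pvHit P j 0 cl j = true := by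
            rw [pvHit_iff]
            exact ⟨0, le_refl 0, by omega, by simp⟩
          rw [hh, Bool.or_true, if_pos rfl]
          exact_mod_cast hstop
        · rw [if_neg hjm]
          have hh : pvHit P m 1 s j = pvHit P m 0 cl j := by
            rw [Bool.eq_iff_iff, pvHit_iff, pvHit_iff]
            constructor
            · rintro ⟨t, h1, h2, h3⟩; exact ⟨t, by omega, by omega, h3⟩
            · rintro ⟨t, h1, h2, h3⟩
              refine ⟨t, ?_, by omega, h3⟩
              rcases Nat.eq_zero_or_pos t with h4 | h4
              · subst h4; simp at h3; exact absurd h3 (fun he => hjm he.symm)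
              · omega
          rw [hh]

-- === B's pointer chase marks exactly the cycle of m, counting cl steps ===
theorem pv_walkB_spec (P : List Int)
    (hG : ∀ j < P.length, 0 ≤ P.getD j 0 ∧ P.getD j 0 < P.length) (hnd : P.Nodup)
    (vis : List Bool) (m : Nat) (hm : m < P.length)
    (horb : ∀ t, vis.getD ((pvF P)^[t] m) false = false) :
    ∀ fuel s visS cyc, s ≤ Function.minimalPeriod (pvF P) m →
      Function.minimalPeriod (pvF P) m - s < fuel →
      visS.length = P.length →
      (∀ j < P.length, visS.getD j false = (vis.getD j false || pvHit P m 0 s j)) →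
      ∃ vis', pvWalkB P fuel (visS, (((pvF P)^[s] m : Nat) : Int), cyc)
          = (vis', (m : Int), cyc + ((Function.minimalPeriod (pvF P) m - s : Nat) : Int))
        ∧ vis'.length = P.length
        ∧ (∀ j < P.length, vis'.getD j false = (vis.getD j false || pvHit P m 0 (Function.minimalPeriod (pvF P) m) j)) := by
  intro fuel
  induction fuel with
  | zero => intro s visS cyc hs hfuel; omega
  | succ f ih =>
    intro s visS cyc hs hfuel hlen hchar
    set cl := Function.minimalPeriod (pvF P) m with hcl
    have hslt : (pvF P)^[s] m < P.length := pvF_iter_lt P hG m hm s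
    have hvisj : PySem.List.pyGetD visS (((pvF P)^[s] m : Nat) : Int) false
        = (vis.getD ((pvF P)^[s] m) false || pvHit P m 0 s ((pvF P)^[s] m)) := by
      rw [PySem.List.pyGetD_natCast]; exact hchar _ hslt
    rcases Nat.lt_or_ge s cl with hlt | hge
    · -- continue the walk
      have hhit : pvHit P m 0 s ((pvF P)^[s] m) = false := by
        rw [Bool.eq_false_iff]
        intro h
        obtain ⟨t, _, ht, he⟩ := (pvHit_iff _ _ _ _ _).mp h
        have : t = s := Function.iterate_injOn_Iio_minimalPeriod
          (Set.mem_Iio.mpr (by omega)) (Set.mem_Iio.mpr (by omega)) he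
        omega
      have hcond : PySem.List.pyGetD visS (((pvF P)^[s] m : Nat) : Int) false = false := by
        rw [hvisj, horb s, hhit]; rfl
      have hnext : PySem.List.pyGetD P (((pvF P)^[s] m : Nat) : Int) 0
          = (((pvF P)^[s + 1] m : Nat) : Int) := by
        rw [PySem.List.pyGetD_natCast, Function.iterate_succ_apply']
        have h2 := hG _ hslt
        simp only [pvF]
        omega
      have hset : PySem.List.pySetD visS (((pvF P)^[s] m : Nat) : Int) true
          = visS.set ((pvF P)^[s] m) true := PySem.List.pySetD_natCast _ _ _
      obtain ⟨vis', heq, hlen', hchar'⟩ := ih (s + 1) (visS.set ((pvF P)^[s] m) true) (cyc + 1)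
        (by omega) (by omega) (by simpa using hlen)
        (by
          intro j hj
          rw [pv_getD_set, hchar j hj]
          split_ifs with hc
          · symm
            simp only [Bool.or_eq_true, pvHit_iff]
            exact Or.inr ⟨s, by omega, by omega, hc.1⟩
          · have hne : (pvF P)^[s] m ≠ j := fun he => hc ⟨he, by omega⟩
            have hpe : pvHit P m 0 s j = pvHit P m 0 (s + 1) j := by
              rw [Bool.eq_iff_iff, pvHit_iff, pvHit_iff]
              constructor
              · rintro ⟨t, h1, h2, h3⟩; exact ⟨t, h1, by omega, h3⟩
              · rintro ⟨t, h1, h2, h3⟩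
                refine ⟨t, h1, ?_, h3⟩
                rcases Nat.lt_or_ge t s with h4 | h4
                · exact h4
                · have : t = s := by omega
                  subst this
                  exact absurd h3 hne
            rw [hpe])
      refine ⟨vis', ?_, hlen', hchar'⟩
      show pvWalkB P (f + 1) (visS, _, cyc) = _
      rw [show pvWalkB P (f + 1) (visS, (((pvF P)^[s] m : Nat) : Int), cyc)
          = pvWalkB P f (PySem.List.pySetD visS (((pvF P)^[s] m : Nat) : Int) true,
              PySem.List.pyGetD P (((pvF P)^[s] m : Nat) : Int) 0, cyc + 1) by
        simp [pvWalkB, hcond]]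
      rw [hset, hnext, heq]
      congr 2
      omega
    · -- s = cl : stop
      have hseq : s = cl := by omega
      have hclpos : 0 < cl := pv_cl_pos P hG hnd m hm
      have hiter : (pvF P)^[cl] m = m := by rw [hcl]; exact Function.iterate_minimalPeriod
      have hstop : pvHit P m 0 s ((pvF P)^[s] m) = true := by
        rw [pvHit_iff]
        exact ⟨0, Nat.zero_le 0, by omega, by simp [hseq, hiter]⟩
      have hcond : PySem.List.pyGetD visS (((pvF P)^[s] m : Nat) : Int) false = true := by
        rw [hvisj, hstop]; simp
      refine ⟨visS, ?_, hlen, by rw [← hseq]; exact hchar⟩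
      show pvWalkB P (f + 1) (visS, _, cyc) = _
      rw [show pvWalkB P (f + 1) (visS, (((pvF P)^[s] m : Nat) : Int), cyc)
          = (visS, (((pvF P)^[s] m : Nat) : Int), cyc) by simp [pvWalkB, hcond]]
      rw [hseq, hiter]
      simp

-- === the two outer folds agree, given the coupling invariant ===
theorem pv_outer_sim (P : List Int)
    (hG : ∀ j < P.length, 0 ≤ P.getD j 0 ∧ P.getD j 0 < P.length) (hnd : P.Nodup) :
    ∀ (d : Nat) (i : Nat) q vis k, i + d = P.length →
      q.length = P.length → vis.length = P.length →
      (∀ j < P.length, q.getD j 0 = if vis.getD j false = true then (j : Int) else P.getD j 0) →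
      (∀ j < P.length, vis.getD j false = true → vis.getD (pvF P j) false = true) →
      ((PySem.List.pyRange (i : Int) (P.length : Int) 1).foldl
          (fun s x => pvWhileQ x (P.length + 1) s) (q, k)).2
        = ((PySem.List.pyRange (i : Int) (P.length : Int) 1).foldl (pvBstep P) (vis, k)).2 := by
  intro d
  induction d with
  | zero =>
    intro i q vis k hd hql hvl hqc hcl
    have : i = P.length := by omega
    subst this
    rw [PySem.List.pyRange_one_eq_nil (le_refl _)]
    simp
  | succ d ih =>
    intro i q vis k hd hql hvl hqc hcl
    have hilt : i < P.length := by omega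
    have hcast : ((i : Int)) < (P.length : Int) := by exact_mod_cast hilt
    rw [PySem.List.pyRange_one_cons hcast]
    simp only [List.foldl_cons]
    have hstep : ((i : Int) + 1) = ((i + 1 : Nat) : Int) := by push_cast; ring
    by_cases hv : vis.getD i false = true
    · -- visited: both sides skip
      have hqi : PySem.List.pyGetD q (i : Int) 0 = (i : Int) := by
        rw [PySem.List.pyGetD_natCast, hqc i hilt, if_pos hv]
      have hA : pvWhileQ (i : Int) (P.length + 1) (q, k) = (q, k) := by
        rw [pvWhileQ_step, if_pos hqi]
      have hB : pvBstep P (vis, k) (i : Int) = (vis, k) := by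
        unfold pvBstep
        simp only [PySem.List.pyGetD_natCast]
        rw [hv]
        simp
      rw [hA, hB, hstep]
      exact ih (i + 1) q vis k (by omega) hql hvl hqc hcl
    · -- unvisited: A resolves the cycle, B walks it
      have hv' : vis.getD i false = false := by
        cases h : vis.getD i false
        · rfl
        · exact absurd h hv
      set cl := Function.minimalPeriod (pvF P) i with hclw
      have hclpos : 0 < cl := pv_cl_pos P hG hnd i hilt
      have hclle : cl ≤ P.length := pv_cl_le P hG hnd i hilt
      have horb : ∀ t, vis.getD ((pvF P)^[t] i) false = false :=
        pv_orbit_unvis P hG hnd vis hcl i hilt hv'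
      obtain ⟨q', heqA, hql', hqc'⟩ := pv_whileQ_spec P hG hnd vis i hilt horb
        (P.length + 1) 1 q k (le_refl 1) (by omega) (by omega) hql
        (by
          intro j hj
          rw [hqc j hj]
          by_cases hjm : j = i
          · subst hjm
            rw [if_pos rfl, hv']
            have h1 := hG j hj
            simp only [if_neg (by simp : ¬ (false = true)), Function.iterate_one, pvF]
            omega
          · rw [if_neg hjm]
            have : pvHit P i 1 1 j = false := by simp [pvHit]
            rw [this, Bool.or_false])
      obtain ⟨vis', heqB, hvl', hvc'⟩ := pv_walkB_spec P hG hnd vis i hilt horb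
        (P.length + 1) 0 vis 0 (by omega) (by omega) hvl
        (by intro j hj; simp [pvHit])
      have hA : pvWhileQ (i : Int) (P.length + 1) (q, k) = (q', k + ((cl - 1 : Nat) : Int)) := heqA
      have hB : pvBstep P (vis, k) (i : Int) = (vis', k + ((cl : Nat) : Int) - 1) := by
        unfold pvBstep
        simp only [PySem.List.pyGetD_natCast]
        rw [hv']
        simp only [Bool.false_eq_true, if_false]
        have : pvWalkB P (P.length + 1) (vis, (i : Int), 0) = (vis', (i : Int), 0 + ((cl - 0 : Nat) : Int)) := by
          simpa using heqB
        rw [this]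
        simp
      rw [hA, hB, hstep]
      have hkk : k + ((cl - 1 : Nat) : Int) = k + ((cl : Nat) : Int) - 1 := by
        push_cast [Nat.cast_sub hclpos]
        ring
      rw [hkk]
      apply ih (i + 1) q' vis' _ (by omega) hql' hvl'
      · intro j hj
        rw [hqc' j hj, hvc' j hj]
      · intro j hj hvt
        have hFlt : pvF P j < P.length := by have := hG j hj; unfold pvF; omega
        rw [hvc' j hj] at hvt
        rw [hvc' (pvF P j) hFlt]
        rcases Bool.or_eq_true_iff.mp hvt with h | h
        · rw [hcl j hj h]
          simp
        · obtain ⟨t, _, ht, hte⟩ := (pvHit_iff _ _ _ _ _).mp h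
          have hFj : pvF P j = (pvF P)^[t + 1] i := by
            rw [Function.iterate_succ_apply', hte]
          rcases Nat.lt_or_ge (t + 1) cl with h4 | h4
          · have : pvHit P i 0 cl (pvF P j) = true := by
              rw [pvHit_iff]; exact ⟨t + 1, by omega, h4, hFj.symm⟩
            rw [this]; simp
          · have hteq : t + 1 = cl := by omega
            have : pvF P j = i := by
              rw [hFj, hteq, hclw]
              exact Function.iterate_minimalPeriod
            rw [this]
            have : pvHit P i 0 cl i = true := by
              rw [pvHit_iff]; exact ⟨0, le_refl 0, by omega, by simp⟩
            rw [this]; simp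

-- === port A's while loop simulates pvWhileQ through the lookup map ===
theorem pv_pyGetD_map_tp (tp : PySem.Dict Int Int) (c : List Int) (i : Int)
    (h0 : 0 ≤ i) (h1 : i < (c.length : Int)) :
    PySem.List.pyGetD (c.map (fun v => tp.getD v 0)) i 0 = tp.getD (PySem.List.pyGetD c i 0) 0 := by
  rw [PySem.List.pyGetD_eq_getElem c 0 h0 h1,
    PySem.List.pyGetD_eq_getElem (c.map (fun v => tp.getD v 0)) 0 h0 (by simpa using h1)]
  simp

theorem pv_whileA_sim (tp : PySem.Dict Int Int) :
    ∀ fuel (c : List Int) k (i : Int), 0 ≤ i → i < (c.length : Int) →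
      (∀ x ∈ c, 0 ≤ tp.getD x 0 ∧ tp.getD x 0 < (c.length : Int)) →
      (pvWhileA tp i fuel (c, k)).1.map (fun v => tp.getD v 0)
          = (pvWhileQ i fuel (c.map (fun v => tp.getD v 0), k)).1
      ∧ (pvWhileA tp i fuel (c, k)).2 = (pvWhileQ i fuel (c.map (fun v => tp.getD v 0), k)).2
      ∧ (pvWhileA tp i fuel (c, k)).1.length = c.length
      ∧ (∀ x ∈ (pvWhileA tp i fuel (c, k)).1, 0 ≤ tp.getD x 0 ∧ tp.getD x 0 < (c.length : Int)) := by
  intro fuel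
  induction fuel with
  | zero =>
    intro c k i h0 h1 hvals
    exact ⟨rfl, rfl, rfl, hvals⟩
  | succ f ih =>
    intro c k i h0 h1 hvals
    have hlt : i.toNat < c.length := by omega
    have hmemi : PySem.List.pyGetD c i 0 ∈ c := by
      rw [PySem.List.pyGetD_eq_getElem c 0 h0 h1]
      exact List.getElem_mem hlt
    have hqi := pv_pyGetD_map_tp tp c i h0 h1
    by_cases hstop : tp.getD (PySem.List.pyGetD c i 0) 0 = i
    · have hA : pvWhileA tp i (f + 1) (c, k) = (c, k) := by
        show (if tp.getD (PySem.List.pyGetD c i 0) 0 = i then (c, k) else _) = (c, k)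
        rw [if_pos hstop]
      have hQ : pvWhileQ i (f + 1) (c.map (fun v => tp.getD v 0), k) = (c.map (fun v => tp.getD v 0), k) := by
        show (if PySem.List.pyGetD (c.map (fun v => tp.getD v 0)) i 0 = i then _ else _) = _
        rw [if_pos (hqi.trans hstop)]
      rw [hA, hQ]
      exact ⟨rfl, rfl, rfl, hvals⟩
    · set t : Int := tp.getD (PySem.List.pyGetD c i 0) 0 with htdef
      have htb : 0 ≤ t ∧ t < (c.length : Int) := hvals _ hmemi
      have htlt : t.toNat < c.length := by omega
      have hmemt : PySem.List.pyGetD c t 0 ∈ c := by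
        rw [PySem.List.pyGetD_eq_getElem c 0 htb.1 htb.2]
        exact List.getElem_mem htlt
      have hqt := pv_pyGetD_map_tp tp c t htb.1 htb.2
      set c' : List Int := (c.set i.toNat (PySem.List.pyGetD c t 0)).set t.toNat (PySem.List.pyGetD c i 0) with hc'def
      have hA : pvWhileA tp i (f + 1) (c, k) = pvWhileA tp i f (c', k + 1) := by
        show (if tp.getD (PySem.List.pyGetD c i 0) 0 = i then (c, k) else
          pvWhileA tp i f (PySem.List.pySetD (PySem.List.pySetD c i (PySem.List.pyGetD c (tp.getD (PySem.List.pyGetD c i 0) 0) 0)) (tp.getD (PySem.List.pyGetD c i 0) 0) (PySem.List.pyGetD c i 0), k + 1)) = _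
        rw [if_neg hstop, ← htdef,
          PySem.List.pySetD_of_nonneg _ _ h0, PySem.List.pySetD_of_nonneg _ _ htb.1]
      have hmap : c'.map (fun v => tp.getD v 0)
          = ((c.map (fun v => tp.getD v 0)).set i.toNat (tp.getD (PySem.List.pyGetD c t 0) 0)).set t.toNat (tp.getD (PySem.List.pyGetD c i 0) 0) := by
        rw [hc'def]
        simp [List.map_set]
      have hQ : pvWhileQ i (f + 1) (c.map (fun v => tp.getD v 0), k)
          = pvWhileQ i f (c'.map (fun v => tp.getD v 0), k + 1) := by
        show (if PySem.List.pyGetD (c.map (fun v => tp.getD v 0)) i 0 = i then _ else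
          pvWhileQ i f (PySem.List.pySetD (PySem.List.pySetD (c.map (fun v => tp.getD v 0)) i (PySem.List.pyGetD (c.map (fun v => tp.getD v 0)) (PySem.List.pyGetD (c.map (fun v => tp.getD v 0)) i 0) 0)) (PySem.List.pyGetD (c.map (fun v => tp.getD v 0)) i 0) (PySem.List.pyGetD (c.map (fun v => tp.getD v 0)) i 0), k + 1)) = _
        rw [if_neg (fun h => hstop (hqi.symm.trans h))]
        rw [hqi, hqt]
        rw [PySem.List.pySetD_of_nonneg _ _ h0, PySem.List.pySetD_of_nonneg _ _ htb.1]
        rw [hmap, htdef]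
      have hvals' : ∀ x ∈ c', 0 ≤ tp.getD x 0 ∧ tp.getD x 0 < (c.length : Int) := by
        intro x hx
        rcases List.mem_or_eq_of_mem_set hx with hx2 | hx2
        · rcases List.mem_or_eq_of_mem_set hx2 with hx3 | hx3
          · exact hvals x hx3
          · subst hx3; exact hvals _ hmemt
        · subst hx2; exact hvals _ hmemi
      have hlen' : c'.length = c.length := by simp [hc'def]
      obtain ⟨m1, m2, m3, m4⟩ := ih c' (k + 1) i h0 (by rw [hlen']; exact h1) (by rw [hlen']; exact hvals')
      rw [hA, hQ]
      refine ⟨m1, m2, by rw [m3, hlen'], by rw [hlen'] at m4; exact m4⟩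

theorem pv_outerA_sim (tp : PySem.Dict Int Int) (n : Nat) :
    ∀ (d : Nat) (i : Nat) (c : List Int) k, i + d = n →
      c.length = n →
      (∀ x ∈ c, 0 ≤ tp.getD x 0 ∧ tp.getD x 0 < (n : Int)) →
      ((PySem.List.pyRange (i : Int) (n : Int) 1).foldl
          (fun s x => pvWhileA tp x (n + 1) s) (c, k)).2
        = ((PySem.List.pyRange (i : Int) (n : Int) 1).foldl
          (fun s x => pvWhileQ x (n + 1) s) (c.map (fun v => tp.getD v 0), k)).2 := by
  intro d
  induction d with
  | zero =>
    intro i c k hd hcl hvals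
    have : i = n := by omega
    subst this
    rw [PySem.List.pyRange_one_eq_nil (le_refl _)]
    simp
  | succ d ih =>
    intro i c k hd hcl hvals
    have hilt : i < n := by omega
    have hcast : ((i : Int)) < (n : Int) := by exact_mod_cast hilt
    rw [PySem.List.pyRange_one_cons hcast]
    simp only [List.foldl_cons]
    obtain ⟨m1, m2, m3, m4⟩ := pv_whileA_sim tp (n + 1) c k (i : Int) (by positivity)
      (by rw [hcl]; exact hcast) (by rw [hcl]; exact hvals)
    have hstep : ((i : Int) + 1) = ((i + 1 : Nat) : Int) := by push_cast; ring
    rw [hstep]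
    have hpair : (pvWhileQ (i : Int) (n + 1) (c.map (fun v => tp.getD v 0), k))
        = ((pvWhileA tp (i : Int) (n + 1) (c, k)).1.map (fun v => tp.getD v 0),
           (pvWhileA tp (i : Int) (n + 1) (c, k)).2) := by
      rw [m1, m2]
    rw [hpair]
    have hres := ih (i + 1) (pvWhileA tp (i : Int) (n + 1) (c, k)).1 (pvWhileA tp (i : Int) (n + 1) (c, k)).2
      (by omega) (by rw [m3, hcl]) (by rw [hcl] at m4; exact m4)
    exact hres

theorem pv_getD_replicate (n j : Nat) : (List.replicate n false).getD j false = false := by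
  simp [List.getD_eq_getElem?_getD]

-- ===== VERDICT (by name: the statement is the Claim_ definition above) =====
theorem count_swaps_to_interconvert_py_spec : Claim_equal_count_swaps_to_interconvert_py := by
  intro perm sorted_perm _hdom hpre
  unfold Spec_count_swaps_to_interconvert_py
  unfold count_swaps_to_interconvert_py count_swaps_to_interconvert_py_alt
  by_cases hlen : perm.length ≠ sorted_perm.length
  · rw [if_pos hlen, if_pos hlen]
  · rw [if_neg hlen, if_neg hlen]
    push_neg at hlen
    have hpp : perm.Nodup ∧ perm.Perm sorted_perm := by
      rcases hpre with h | h
      · exact absurd hlen h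
      · exact h
    obtain ⟨ndp, hperm⟩ := hpp
    have nds : sorted_perm.Nodup := hperm.nodup_iff.mp ndp
    have hlen2 : perm.length = sorted_perm.length := hperm.length_eq
    set tp := pvTargetPosA sorted_perm with htp
    have htpB : pvTargetPosB sorted_perm = tp := rfl
    set P : List Int := perm.map (fun v => tp.getD v 0) with hP
    have hPI : ∀ v ∈ perm, tp.getD v 0 = pvI sorted_perm v := by
      intro v _; rfl
    have hPlen : P.length = perm.length := by simp [hP]
    have hmemb : ∀ x ∈ perm, 0 ≤ tp.getD x 0 ∧ tp.getD x 0 < (perm.length : Int) := by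
      intro x hx
      have hxs : x ∈ sorted_perm := hperm.mem_iff.mp hx
      have := pvI_mem sorted_perm nds x hxs
      rw [hPI x hx, hlen2]
      exact ⟨this.1, this.2.1⟩
    have hG : ∀ j < P.length, 0 ≤ P.getD j 0 ∧ P.getD j 0 < P.length := by
      intro j hj
      have hj' : j < perm.length := by omega
      have hgd : P.getD j 0 = tp.getD (perm.getD j 0) 0 := by
        rw [List.getD_eq_getElem _ _ hj, List.getD_eq_getElem _ _ hj']
        exact List.getElem_map _
      rw [hgd, hPlen]
      exact hmemb _ (by rw [List.getD_eq_getElem _ _ hj']; exact List.getElem_mem hj')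
    have ndP : P.Nodup := by
      rw [hP]
      refine List.Nodup.map_on ?_ ndp
      intro x hx y hy hxy
      rw [hPI x hx, hPI y hy] at hxy
      have h1 := pvI_mem sorted_perm nds x (hperm.mem_iff.mp hx)
      have h2 := pvI_mem sorted_perm nds y (hperm.mem_iff.mp hy)
      rw [← h1.2.2, ← h2.2.2, hxy]
    -- A port = fold of pvWhileQ over P
    have e1 := pv_outerA_sim tp perm.length perm.length 0 perm 0 (by omega) rfl
      (by exact_mod_cast hmemb)
    -- fold of pvWhileQ over P = fold of pvBstep over P
    have e2 := pv_outer_sim P hG ndP P.length 0 P (List.replicate P.length false) 0 (by omega)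
      rfl (by simp)
      (by intro j hj; rw [pv_getD_replicate]; simp)
      (by intro j hj hc; rw [pv_getD_replicate] at hc; exact absurd hc (by simp))
    have hBfun : pvBstep P = (fun (s : List Bool × Int) (i : Int) =>
        if PySem.List.pyGetD s.1 i false = true then s
        else
          ((pvWalkB P (perm.length + 1) (s.1, i, 0)).1,
           s.2 + (pvWalkB P (perm.length + 1) (s.1, i, 0)).2.2 - 1)) := by
      funext s i
      unfold pvBstep
      rw [hPlen]
    rw [hPlen, hBfun] at e2
    refine e1.trans ?_
    dsimp only
    simp only [List.length_map]
    exact e2
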